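-- pv_equiv track=rewrite | github.com/gargpriyal10/Autonomous-Security-Policy-Reasoning-Misconfiguration-Detection-Platform | core/policy_engine.py | service_risk_analytics
-- ===== SOURCE A (Python) =====
-- def service_risk_analytics(issues):
--     service_data = {}
--
--     for issue in issues:
--         service = issue.get("service", "Unknown")
--         severity = issue.get("severity", "Low")
--
--         if service not in service_data:
--             service_data[service] = {"issues": 0, "risk_score": 0}
--
--         service_data[service]["issues"] += 1
--
--         if severity == "High":
--             service_data[service]["risk_score"] += 3
--         elif severity == "Medium":
--             service_data[service]["risk_score"] += 2
--         else:
--             service_data[service]["risk_score"] += 1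
--
--     return service_data
-- ===== SOURCE B (Python) =====
-- def service_risk_analytics(issues):
--     # Phase 1: partition -- group the severities of each service.
--     groups = {}
--     for issue in issues:
--         groups.setdefault(issue.get("service", "Unknown"), []).append(issue.get("severity", "Low"))
--     # Phase 2: reduce -- count and score each group.
--     weights = {"High": 3, "Medium": 2}
--     return {service: {"issues": len(sevs),
--                       "risk_score": sum(weights.get(sev, 1) for sev in sevs)}
--             for service, sevs in groups.items()}
-- ===== Notes on version B (the rewrite author's own statement) =====
-- stated objective: alternative
-- what changed: B replaces A's single incremental accumulation loop (per-issue in-place counter/score updates in a nested dict) by a two-phase build-then-reduce: one pass groups severities per service, then a dict comprehension derives issue count and risk score from each group via a weight table.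
import Mathlib
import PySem

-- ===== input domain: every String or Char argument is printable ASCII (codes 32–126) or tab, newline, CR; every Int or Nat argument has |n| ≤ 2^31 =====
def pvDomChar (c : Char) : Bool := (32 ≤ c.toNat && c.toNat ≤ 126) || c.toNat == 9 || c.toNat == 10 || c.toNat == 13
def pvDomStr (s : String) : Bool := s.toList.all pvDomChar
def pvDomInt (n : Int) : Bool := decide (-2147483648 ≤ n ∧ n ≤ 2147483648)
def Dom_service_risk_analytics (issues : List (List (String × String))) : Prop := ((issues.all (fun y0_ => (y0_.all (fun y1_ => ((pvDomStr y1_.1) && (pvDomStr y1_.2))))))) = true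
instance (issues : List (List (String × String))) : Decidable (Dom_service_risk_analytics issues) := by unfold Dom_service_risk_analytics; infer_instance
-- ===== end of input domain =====

-- B replaces A's single incremental accumulation loop by a two-phase partition (group severities per service) then reduce (count + weighted sum); same asymptotic cost, different decomposition.


-- ===== PORT A =====
def service_risk_analytics (issues : List (List (String × String))) : List (String × List (String × Int)) :=
  let service_data : PySem.Dict String (PySem.Dict String Int) :=
    issues.foldl (fun service_data issue =>
      let service := (PySem.Dict.mk issue).getD "service" "Unknown"
      let severity := (PySem.Dict.mk issue).getD "severity" "Low"
      let service_data :=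
        if service_data.contains service = false then
          service_data.insert service (PySem.Dict.mk [("issues", (0 : Int)), ("risk_score", (0 : Int))])
        else service_data
      let service_data :=
        service_data.modify service PySem.Dict.empty (fun inner => inner.modify "issues" 0 (· + 1))
      if severity == "High" then
        service_data.modify service PySem.Dict.empty (fun inner => inner.modify "risk_score" 0 (· + 3))
      else if severity == "Medium" then
        service_data.modify service PySem.Dict.empty (fun inner => inner.modify "risk_score" 0 (· + 2))
      else
        service_data.modify service PySem.Dict.empty (fun inner => inner.modify "risk_score" 0 (· + 1)))
      PySem.Dict.empty
  service_data.items.map (fun p => (p.1, p.2.items))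

-- ===== PORT B =====
def service_risk_analytics_alt (issues : List (List (String × String))) : List (String × List (String × Int)) :=
  -- phase 1: groups = {service: [severities]}
  let groups : PySem.Dict String (List String) :=
    issues.foldl (fun groups issue =>
      groups.modify ((PySem.Dict.mk issue).getD "service" "Unknown") []
        (fun sevs => sevs ++ [(PySem.Dict.mk issue).getD "severity" "Low"]))
      PySem.Dict.empty
  -- phase 2: dict comprehension over groups (keys are unique, so items = map)
  let weights : PySem.Dict String Int := PySem.Dict.mk [("High", 3), ("Medium", 2)]
  groups.items.map (fun p =>
    (p.1, [("issues", (p.2.length : Int)),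
           ("risk_score", (p.2.map (fun sev => weights.getD sev 1)).sum)]))

-- ===== PRECONDITION & SPEC =====
def Spec_service_risk_analytics (issues : List (List (String × String))) (out : List (String × List (String × Int))) : Prop := out = service_risk_analytics_alt issues
instance (issues : List (List (String × String))) (out : List (String × List (String × Int))) : Decidable (Spec_service_risk_analytics issues out) := by unfold Spec_service_risk_analytics; infer_instance

-- ===== CLAIM (what is proved, stated in full; the proofs are below) =====
def Claim_equal_service_risk_analytics : Prop := ∀ (issues : List (List (String × String))), Dom_service_risk_analytics issues → Spec_service_risk_analytics issues (service_risk_analytics issues)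

-- ===== LEMMAS AND PROOFS =====

/-- weight of a severity, the way A branches on it -/
def pvW (x : String) : Int := if x == "High" then 3 else if x == "Medium" then 2 else 1

/-- the inner counter dict A keeps for a service whose group of severities is `sevs` -/
def pvReduce (sevs : List String) : PySem.Dict String Int :=
  PySem.Dict.mk [("issues", (sevs.length : Int)), ("risk_score", (sevs.map pvW).sum)]

/-- relate one entry of A's nested dict to one entry of B's grouping dict -/
def pvF (p : String × List String) : String × PySem.Dict String Int := (p.1, pvReduce p.2)

theorem pv_get?_map (l : List (String × List String)) (k : String) :
    (PySem.Dict.mk (l.map pvF)).get? k = ((PySem.Dict.mk l).get? k).map pvReduce := by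
  induction l with
  | nil => rfl
  | cons p rest ih =>
    obtain ⟨k1, v1⟩ := p
    simp only [List.map_cons, pvF, PySem.Dict.get?_mk_cons]
    by_cases h : k1 == k
    · simp [h]
    · simp only [h, Bool.false_eq_true, if_false]
      exact ih

theorem pv_get?_rel (d : PySem.Dict String (PySem.Dict String Int))
    (g : PySem.Dict String (List String)) (h : d.items = g.items.map pvF) (k : String) :
    d.get? k = (g.get? k).map pvReduce := by
  obtain ⟨l⟩ := d; obtain ⟨m⟩ := g
  subst h
  exact pv_get?_map m k

theorem pv_contains_rel (d : PySem.Dict String (PySem.Dict String Int))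
    (g : PySem.Dict String (List String)) (h : d.items = g.items.map pvF) (k : String) :
    d.contains k = g.contains k := by
  rw [PySem.Dict.contains_eq_isSome_get?, PySem.Dict.contains_eq_isSome_get?, pv_get?_rel d g h]
  cases g.get? k <;> rfl

theorem pv_insert_rel (d : PySem.Dict String (PySem.Dict String Int))
    (g : PySem.Dict String (List String)) (h : d.items = g.items.map pvF)
    (s : String) (w : List String) :
    (d.insert s (pvReduce w)).items = (g.insert s w).items.map pvF := by
  have hc := pv_contains_rel d g h s
  unfold PySem.Dict.insert
  rw [hc]
  cases hgb : g.contains s with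
  | false =>
    simp only [Bool.false_eq_true, if_false, h, List.map_append]
    rfl
  | true =>
    simp only [if_true, h, List.map_map]
    apply List.map_congr_left
    intro p _
    by_cases hp : p.1 == s <;> simp [Function.comp, pvF, hp]

/-- one update of the inner counter dict tracks appending one severity to the group -/
theorem pv_reduce_step (l : List String) (x : String) :
    ((pvReduce l).modify "issues" 0 (· + 1)).modify "risk_score" 0 (· + pvW x)
      = pvReduce (l ++ [x]) := by
  simp [pvReduce, PySem.Dict.modify, PySem.Dict.insert, PySem.Dict.getD_eq_get?_getD,
        PySem.Dict.get?_mk_cons, PySem.Dict.contains_mk]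

/-- one iteration of A's loop body preserves the relation with one iteration of B's loop body -/
theorem pv_step (s sev : String)
    (d : PySem.Dict String (PySem.Dict String Int)) (g : PySem.Dict String (List String))
    (h : d.items = g.items.map pvF) :
    (if sev == "High" then
      ((if d.contains s = false then
          d.insert s (PySem.Dict.mk [("issues", (0 : Int)), ("risk_score", (0 : Int))])
        else d).modify s PySem.Dict.empty (fun inner => inner.modify "issues" 0 (· + 1))).modify s
        PySem.Dict.empty (fun inner => inner.modify "risk_score" 0 (· + 3))
    else if sev == "Medium" then
      ((if d.contains s = false then
          d.insert s (PySem.Dict.mk [("issues", (0 : Int)), ("risk_score", (0 : Int))])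
        else d).modify s PySem.Dict.empty (fun inner => inner.modify "issues" 0 (· + 1))).modify s
        PySem.Dict.empty (fun inner => inner.modify "risk_score" 0 (· + 2))
    else
      ((if d.contains s = false then
          d.insert s (PySem.Dict.mk [("issues", (0 : Int)), ("risk_score", (0 : Int))])
        else d).modify s PySem.Dict.empty (fun inner => inner.modify "issues" 0 (· + 1))).modify s
        PySem.Dict.empty (fun inner => inner.modify "risk_score" 0 (· + 1))).items
    = (g.modify s [] (fun sevs => sevs ++ [sev])).items.map pvF := by
  have hc := pv_contains_rel d g h s
  -- collapse A's two successive modifies at key s into a single insert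
  have hstep : ∀ (d' : PySem.Dict String (PySem.Dict String Int)),
      (if sev == "High" then
        (d'.modify s PySem.Dict.empty (fun inner => inner.modify "issues" 0 (· + 1))).modify s
          PySem.Dict.empty (fun inner => inner.modify "risk_score" 0 (· + 3))
      else if sev == "Medium" then
        (d'.modify s PySem.Dict.empty (fun inner => inner.modify "issues" 0 (· + 1))).modify s
          PySem.Dict.empty (fun inner => inner.modify "risk_score" 0 (· + 2))
      else
        (d'.modify s PySem.Dict.empty (fun inner => inner.modify "issues" 0 (· + 1))).modify s
          PySem.Dict.empty (fun inner => inner.modify "risk_score" 0 (· + 1)))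
      = d'.insert s (((d'.getD s PySem.Dict.empty).modify "issues" 0 (· + 1)).modify
          "risk_score" 0 (· + pvW sev)) := by
    intro d'
    unfold PySem.Dict.modify
    rw [PySem.Dict.insert_insert_self, PySem.Dict.insert_insert_self,
      PySem.Dict.insert_insert_self]
    simp only [PySem.Dict.getD_insert_self]
    by_cases h1 : sev == "High"
    · simp [h1, pvW]
    · by_cases h2 : sev == "Medium" <;> simp [h1, h2, pvW]
  cases hgb : g.contains s with
  | true =>
    -- existing key: its current inner dict is the reduction of its current group
    have hdc : (d.contains s = false) = False := by rw [hc, hgb]; simp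
    have hgd : d.getD s PySem.Dict.empty = pvReduce (g.getD s []) := by
      rw [PySem.Dict.getD_eq_get?_getD, PySem.Dict.getD_eq_get?_getD, pv_get?_rel d g h]
      rcases hsome : g.get? s with _ | v
      · rw [PySem.Dict.contains_eq_isSome_get?, hsome] at hgb; simp at hgb
      · rfl
    simp only [hdc, if_false]
    rw [hstep, hgd, pv_reduce_step, PySem.Dict.modify]
    exact pv_insert_rel d g h s _
  | false =>
    -- new key: it is first installed with the reduction of the empty group
    have hdc : (d.contains s = false) = True := by rw [hc, hgb]; simp
    have h0 : (PySem.Dict.mk [("issues", (0 : Int)), ("risk_score", (0 : Int))])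
        = pvReduce [] := rfl
    have h1 : (d.insert s (pvReduce [])).items = (g.insert s []).items.map pvF :=
      pv_insert_rel d g h s []
    simp only [hdc, if_true, h0]
    rw [hstep, PySem.Dict.getD_insert_self, pv_reduce_step, PySem.Dict.modify]
    have hg0 : g.getD s ([] : List String) = [] := by
      rw [PySem.Dict.getD_eq_get?_getD]
      rw [PySem.Dict.contains_eq_isSome_get?] at hgb
      rcases hx : g.get? s with _ | v
      · rfl
      · rw [hx] at hgb; simp at hgb
    have h2 : g.insert s (g.getD s [] ++ [sev])
        = (g.insert s []).insert s (([] : List String) ++ [sev]) := by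
      rw [hg0, PySem.Dict.insert_insert_self]
    rw [h2]
    exact pv_insert_rel _ _ h1 s _

/-- the loop invariant: A's nested dict is B's grouping dict with each group reduced -/
theorem pv_inv (issues : List (List (String × String)))
    (d : PySem.Dict String (PySem.Dict String Int)) (g : PySem.Dict String (List String))
    (h : d.items = g.items.map pvF) :
    (issues.foldl (fun service_data issue =>
      let service := (PySem.Dict.mk issue).getD "service" "Unknown"
      let severity := (PySem.Dict.mk issue).getD "severity" "Low"
      let service_data :=
        if service_data.contains service = false then
          service_data.insert service (PySem.Dict.mk [("issues", (0 : Int)), ("risk_score", (0 : Int))])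
        else service_data
      let service_data :=
        service_data.modify service PySem.Dict.empty (fun inner => inner.modify "issues" 0 (· + 1))
      if severity == "High" then
        service_data.modify service PySem.Dict.empty (fun inner => inner.modify "risk_score" 0 (· + 3))
      else if severity == "Medium" then
        service_data.modify service PySem.Dict.empty (fun inner => inner.modify "risk_score" 0 (· + 2))
      else
        service_data.modify service PySem.Dict.empty (fun inner => inner.modify "risk_score" 0 (· + 1))) d).items
    = (issues.foldl (fun groups issue =>
        groups.modify ((PySem.Dict.mk issue).getD "service" "Unknown") []
          (fun sevs => sevs ++ [(PySem.Dict.mk issue).getD "severity" "Low"])) g).items.map pvF := by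
  induction issues generalizing d g with
  | nil => exact h
  | cons issue rest ih =>
    apply ih
    exact pv_step ((PySem.Dict.mk issue).getD "service" "Unknown")
      ((PySem.Dict.mk issue).getD "severity" "Low") d g h

/-- B's weight-table lookup agrees with A's branch cascade -/
theorem pv_weight_eq (x : String) :
    (PySem.Dict.mk [("High", (3 : Int)), ("Medium", 2)]).getD x 1 = pvW x := by
  by_cases h1 : x = "High"
  · subst h1; decide
  · by_cases h2 : x = "Medium"
    · subst h2; decide
    · have b1 : (x == "High") = false := by simp [h1]
      have b2 : (x == "Medium") = false := by simp [h2]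
      have b1' : ("High" == x) = false := beq_eq_false_iff_ne.mpr (fun hx => h1 hx.symm)
      have b2' : ("Medium" == x) = false := beq_eq_false_iff_ne.mpr (fun hx => h2 hx.symm)
      simp [PySem.Dict.getD_eq_get?_getD, PySem.Dict.get?,
        pvW, b1, b2, b1', b2']

-- ===== VERDICT (by name: the statement is the Claim_ definition above) =====
theorem service_risk_analytics_spec : Claim_equal_service_risk_analytics := by
  intro issues _
  show service_risk_analytics issues = service_risk_analytics_alt issues
  show (issues.foldl (fun service_data issue =>
      let service := (PySem.Dict.mk issue).getD "service" "Unknown"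
      let severity := (PySem.Dict.mk issue).getD "severity" "Low"
      let service_data :=
        if service_data.contains service = false then
          service_data.insert service (PySem.Dict.mk [("issues", (0 : Int)), ("risk_score", (0 : Int))])
        else service_data
      let service_data :=
        service_data.modify service PySem.Dict.empty (fun inner => inner.modify "issues" 0 (· + 1))
      if severity == "High" then
        service_data.modify service PySem.Dict.empty (fun inner => inner.modify "risk_score" 0 (· + 3))
      else if severity == "Medium" then
        service_data.modify service PySem.Dict.empty (fun inner => inner.modify "risk_score" 0 (· + 2))
      else
        service_data.modify service PySem.Dict.empty (fun inner => inner.modify "risk_score" 0 (· + 1)))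
      PySem.Dict.empty).items.map (fun p => (p.1, p.2.items))
    = (issues.foldl (fun groups issue =>
        groups.modify ((PySem.Dict.mk issue).getD "service" "Unknown") []
          (fun sevs => sevs ++ [(PySem.Dict.mk issue).getD "severity" "Low"])) PySem.Dict.empty).items.map
        (fun p => (p.1, [("issues", (p.2.length : Int)),
          ("risk_score", (p.2.map (fun sev =>
            (PySem.Dict.mk [("High", (3 : Int)), ("Medium", 2)]).getD sev 1)).sum)]))
  rw [pv_inv issues PySem.Dict.empty PySem.Dict.empty rfl, List.map_map]
  apply List.map_congr_left
  intro p _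
  have hw : List.map (fun sev =>
      (PySem.Dict.mk [("High", (3 : Int)), ("Medium", 2)]).getD sev 1) p.2 = List.map pvW p.2 :=
    List.map_congr_left (fun x _ => pv_weight_eq x)
  simp only [Function.comp, pvF, pvReduce, hw]
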